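-- pv_equiv track=rewrite | github.com/FernandoAyach/my-functions | isspacef.py | isspacef
-- ===== SOURCE A (Python) =====
-- def isspacef(string):  # Define a função isspacef
--     """
--         Função que verifica se todos os caracteres de um string são espaços.
--         string: string qualquer.
--         Retorna True se forem todos espaços e False se pelo menos um não for.
--     """
--     if len(string) == 0:  # Se não tem nada
--         return False  # Não há somente espaços
--
--     for i in range(len(string)):  # Percorre toda a string
--         code = ord(string[i])  # Obtem o código do caracter
--
--         if not (code == 32):  # Verifica se não é um espaço
--             return False  # Não há somente espaços
--     return True  # Só tem espaços
-- ===== SOURCE B (Python) =====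
-- def isspacef(string):
--     # Closed form: non-empty and equal to the all-spaces string of its length.
--     return len(string) > 0 and string == ' ' * len(string)
-- ===== Notes on version B (the rewrite author's own statement) =====
-- stated objective: simpler
-- what changed: Replaces the per-character ord-code loop with a single closed-form equality test against the all-spaces string of the same length.
import Mathlib
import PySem

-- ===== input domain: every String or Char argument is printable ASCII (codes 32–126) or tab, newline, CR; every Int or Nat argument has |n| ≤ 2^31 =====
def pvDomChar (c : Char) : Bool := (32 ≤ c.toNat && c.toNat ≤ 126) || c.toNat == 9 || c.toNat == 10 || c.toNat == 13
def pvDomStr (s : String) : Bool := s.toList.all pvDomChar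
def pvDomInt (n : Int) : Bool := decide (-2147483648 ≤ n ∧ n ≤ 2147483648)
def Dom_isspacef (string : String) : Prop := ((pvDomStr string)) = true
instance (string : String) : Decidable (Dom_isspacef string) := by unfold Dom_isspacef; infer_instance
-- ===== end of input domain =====

-- B replaces A's per-character ord-code loop with a closed-form equality against the all-spaces string of the same length (simpler).


-- ===== PORT A =====
-- loop of A: check each character's code, early-return False on a non-space
def isspacefLoop : List Char → Bool
  | [] => true
  | c :: cs => if !(c.toNat == 32) then false else isspacefLoop cs

def isspacef (string : String) : Bool :=
  if string.toList.length == 0 then false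
  else isspacefLoop string.toList

-- ===== PORT B =====
-- B: non-empty and equal to the all-spaces string of the same length
def isspacef_alt (string : String) : Bool :=
  decide (0 < string.toList.length) && (string.toList == List.replicate string.toList.length ' ')

-- ===== PRECONDITION & SPEC =====
def Spec_isspacef (string : String) (out : Bool) : Prop := out = isspacef_alt string
instance (string : String) (out : Bool) : Decidable (Spec_isspacef string out) := by unfold Spec_isspacef; infer_instance

-- ===== CLAIM (what is proved, stated in full; the proofs are below) =====
def Claim_equal_isspacef : Prop := ∀ (string : String), Dom_isspacef string → Spec_isspacef string (isspacef string)

-- ===== LEMMAS AND PROOFS =====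

-- ===== VERDICT (by name: the statement is the Claim_ definition above) =====
theorem loop_eq (l : List Char) :
    isspacefLoop l = (l == List.replicate l.length ' ') := by
  induction l with
  | nil => rfl
  | cons c cs ih =>
      simp only [isspacefLoop, List.length_cons, List.replicate_succ, List.cons_beq_cons, ih]
      by_cases h : c = ' '
      · subst h; simp
      · have hn : c.toNat ≠ 32 := by
          intro hn
          apply h
          apply Char.ext
          apply UInt32.toNat_inj.mp
          show c.toNat = (' ').toNat
          rw [hn]; rfl
        simp [hn, h]

theorem isspacef_spec : Claim_equal_isspacef := by
  intro s _
  unfold Spec_isspacef isspacef isspacef_alt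
  rw [loop_eq]
  cases s.toList with
  | nil => rfl
  | cons c cs => simp
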